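-- pv_equiv track=rewrite | github.com/HarmonicGun/framework_operative_enforrcement | scripts/friday_report_to_html.py | render_traffic_lights
-- ===== SOURCE A (Python) =====
-- from typing import Any
--
-- def render_traffic_lights(projects: list[dict[str, Any]]) -> str:
--     green = sum(1 for p in projects if p.get("metrics", {}).get("traffic_light") == "green")
--     yellow = sum(1 for p in projects if p.get("metrics", {}).get("traffic_light") == "yellow")
--     red = sum(1 for p in projects if p.get("metrics", {}).get("traffic_light") == "red")
--     items = [
--         (str(green), "Verde", "var(--gr)", "var(--gr-dim)"),
--         (str(yellow), "Amarillo", "var(--ye)", "var(--ye-dim)"),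
--         (str(red), "Rojo", "var(--rd)", "var(--rd-dim)"),
--     ]
--     parts = []
--     for val, label, color, bg in items:
--         parts.append(
--             f'<div class="tl-card" style="border-left:3px solid {color}">'
--             f'<div class="tl-val" style="color:{color}">{val}</div>'
--             f'<div class="tl-label">{label}</div></div>'
--         )
--     return "\n".join(parts)
-- ===== SOURCE B (Python) =====
-- from typing import Any
--
--
-- def _card(val: str, label: str, color: str) -> str:
--     return (
--         f'<div class="tl-card" style="border-left:3px solid {color}">'
--         f'<div class="tl-val" style="color:{color}">{val}</div>'
--         f'<div class="tl-label">{label}</div></div>'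
--     )
--
--
-- def render_traffic_lights(projects: list[dict[str, Any]]) -> str:
--     counts: dict = {}
--     for p in projects:
--         color = p.get("metrics", {}).get("traffic_light")
--         counts[color] = counts.get(color, 0) + 1
--     return "\n".join([
--         _card(str(counts.get("green", 0)), "Verde", "var(--gr)"),
--         _card(str(counts.get("yellow", 0)), "Amarillo", "var(--ye)"),
--         _card(str(counts.get("red", 0)), "Rojo", "var(--rd)"),
--     ])
-- ===== Notes on version B (the rewrite author's own statement) =====
-- stated objective: alternative
-- what changed: Replaces A's three separate generator-sum scans of projects (one per color) with a single pass that builds a frequency table of traffic-light values and reads the three counts from it; rendering is factored into a card helper and a direct join instead of A's items-tuple loop.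
import Mathlib
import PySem

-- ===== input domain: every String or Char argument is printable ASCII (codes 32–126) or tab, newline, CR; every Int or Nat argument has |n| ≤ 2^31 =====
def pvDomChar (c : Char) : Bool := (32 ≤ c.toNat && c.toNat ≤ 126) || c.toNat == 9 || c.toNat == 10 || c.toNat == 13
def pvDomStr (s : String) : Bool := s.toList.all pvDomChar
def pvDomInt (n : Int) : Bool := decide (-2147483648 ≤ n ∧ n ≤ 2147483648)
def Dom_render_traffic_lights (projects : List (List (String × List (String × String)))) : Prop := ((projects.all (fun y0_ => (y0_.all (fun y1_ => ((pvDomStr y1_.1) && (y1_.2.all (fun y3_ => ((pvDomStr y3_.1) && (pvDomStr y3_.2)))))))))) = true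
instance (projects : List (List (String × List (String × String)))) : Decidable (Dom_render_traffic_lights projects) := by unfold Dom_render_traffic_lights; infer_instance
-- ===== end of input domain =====

-- B replaces A's three full counting scans of `projects` with one pass that builds a
-- frequency table of traffic-light values and reads the three counts from it.

-- shared subexpression of both Pythons: p.get("metrics", {}).get("traffic_light")
def pvTL (p : List (String × List (String × String))) : Option String :=
  (PySem.Dict.mk ((PySem.Dict.mk p).getD "metrics" [])).get? "traffic_light"

-- ===== PORT A =====
def render_traffic_lights (projects : List (List (String × List (String × String)))) : String :=
  let green : Int := projects.foldl (fun acc p => if pvTL p == some "green" then acc + 1 else acc) 0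
  let yellow : Int := projects.foldl (fun acc p => if pvTL p == some "yellow" then acc + 1 else acc) 0
  let red : Int := projects.foldl (fun acc p => if pvTL p == some "red" then acc + 1 else acc) 0
  let items : List (String × String × String × String) :=
    [(PySem.Int.toStr green, "Verde", "var(--gr)", "var(--gr-dim)"),
     (PySem.Int.toStr yellow, "Amarillo", "var(--ye)", "var(--ye-dim)"),
     (PySem.Int.toStr red, "Rojo", "var(--rd)", "var(--rd-dim)")]
  let parts : List String := items.foldl (fun parts it =>
    parts ++ ["<div class=\"tl-card\" style=\"border-left:3px solid " ++ it.2.2.1 ++ "\">" ++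
              "<div class=\"tl-val\" style=\"color:" ++ it.2.2.1 ++ "\">" ++ it.1 ++ "</div>" ++
              "<div class=\"tl-label\">" ++ it.2.1 ++ "</div></div>"]) []
  PySem.Str.join "\n" parts

-- ===== PORT B =====
def pvCard (val label color : String) : String :=
  "<div class=\"tl-card\" style=\"border-left:3px solid " ++ color ++ "\">" ++
  "<div class=\"tl-val\" style=\"color:" ++ color ++ "\">" ++ val ++ "</div>" ++
  "<div class=\"tl-label\">" ++ label ++ "</div></div>"

def render_traffic_lights_alt (projects : List (List (String × List (String × String)))) : String :=
  let counts : PySem.Dict (Option String) Int := projects.foldl (fun d p =>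
    let color := pvTL p
    d.insert color (d.getD color 0 + 1)) PySem.Dict.empty
  PySem.Str.join "\n"
    [pvCard (PySem.Int.toStr (counts.getD (some "green") 0)) "Verde" "var(--gr)",
     pvCard (PySem.Int.toStr (counts.getD (some "yellow") 0)) "Amarillo" "var(--ye)",
     pvCard (PySem.Int.toStr (counts.getD (some "red") 0)) "Rojo" "var(--rd)"]

-- ===== PRECONDITION & SPEC =====
def Spec_render_traffic_lights (projects : List (List (String × List (String × String)))) (out : String) : Prop := out = render_traffic_lights_alt projects
instance (projects : List (List (String × List (String × String)))) (out : String) : Decidable (Spec_render_traffic_lights projects out) := by unfold Spec_render_traffic_lights; infer_instance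

-- ===== CLAIM (what is proved, stated in full; the proofs are below) =====
def Claim_equal_render_traffic_lights : Prop := ∀ (projects : List (List (String × List (String × String)))), Dom_render_traffic_lights projects → Spec_render_traffic_lights projects (render_traffic_lights projects)

-- ===== LEMMAS AND PROOFS =====

-- B's frequency-table read at color c equals A's counting scan for c.
theorem pvCount_eq (projects : List (List (String × List (String × String)))) (c : String) :
    (projects.foldl (fun d p =>
        let color := pvTL p
        d.insert color (d.getD color 0 + 1)) (PySem.Dict.empty : PySem.Dict (Option String) Int)).getD (some c) 0
      = projects.foldl (fun acc p => if pvTL p == some c then acc + 1 else acc) 0 := by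
  have h1 : List.foldl (fun d p => d.insert (pvTL p) (d.getD (pvTL p) 0 + 1))
      (PySem.Dict.empty : PySem.Dict (Option String) Int) projects
      = List.foldl (fun d x => d.insert x (d.getD x 0 + 1))
      (PySem.Dict.empty : PySem.Dict (Option String) Int) (projects.map pvTL) := by
    rw [List.foldl_map]
  show (List.foldl (fun d p => d.insert (pvTL p) (d.getD (pvTL p) 0 + 1))
      (PySem.Dict.empty : PySem.Dict (Option String) Int) projects).getD (some c) 0
      = projects.foldl (fun acc p => if pvTL p == some c then acc + 1 else acc) 0
  rw [h1, PySem.Dict.getD_foldl_insert_add_one, PySem.Dict.getD_empty,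
      PySem.List.foldl_if_add_one (fun p => pvTL p == some c) projects 0,
      List.count_eq_countP, List.countP_map]
  rfl

-- ===== VERDICT (by name: the statement is the Claim_ definition above) =====
theorem render_traffic_lights_spec : Claim_equal_render_traffic_lights := by
  intro projects _
  show render_traffic_lights projects = render_traffic_lights_alt projects
  unfold render_traffic_lights render_traffic_lights_alt pvCard
  simp only [pvCount_eq, List.foldl, List.nil_append, List.cons_append]
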